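-- pv_equiv track=rewrite | github.com/kimgyuhee/Python | Chapter0_Algorithm/2304/230420/test10.py | solution
-- ===== SOURCE A (Python) =====
-- def solution(answers):
--     answer = { 1 : 0, 2 : 0, 3: 0}
--     answer1 = [1, 2, 3, 4, 5]
--     answer2 = [2, 1, 2, 3, 2, 4, 2, 5]
--     answer3 = [3, 3, 1, 1, 2, 2, 4, 4, 5, 5]
--
--     for i in range(len(answers)) :
--         if answers[i] == answer1[i%len(answer1)]:
--             answer[1] +=1
--         if answers[i] == answer2[i%len(answer2)]:
--             answer[2] +=1
--         if answers[i] == answer3[i%len(answer3)]: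
--             answer[3] +=1
--     sorted_dict = sorted(answer.items(), key = lambda item: item[1], reverse = True)
--
--     result = [sorted_dict[0][0]]
--     for i in range(len(sorted_dict) -1) :
--         if sorted_dict[i][1] == sorted_dict[i+1][1] :
--             result.append(sorted_dict[i+1][0])
--         else :
--             break
--     return result
-- ===== SOURCE B (Python) =====
-- def solution(answers):
--     patterns = [[1, 2, 3, 4, 5],
--                 [2, 1, 2, 3, 2, 4, 2, 5],
--                 [3, 3, 1, 1, 2, 2, 4, 4, 5, 5]]
--     # The three cycles all divide 40, so a histogram of (position mod 40, answer)
--     # pairs determines every pattern's score from just 40 bucket lookups.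
--     freq = {}
--     for i, a in enumerate(answers):
--         key = (i % 40, a)
--         freq[key] = freq.get(key, 0) + 1
--     scores = []
--     for p in patterns:
--         s = 0
--         for r in range(40):
--             s += freq.get((r, p[r % len(p)]), 0)
--         scores.append(s)
--     mx = max(scores)
--     return [k + 1 for k in range(3) if scores[k] == mx]
-- ===== Notes on version B (the rewrite author's own statement) =====
-- stated objective: alternative
-- what changed: B never compares answers to the patterns while scanning: it builds a histogram keyed by (position mod 40, answer) in one pass (40 = lcm of the three cycle lengths), derives each pattern's score from 40 bucket lookups, and selects winners with max(scores) plus an ascending filter instead of A's dict-sort-then-collect-ties.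
import Mathlib
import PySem

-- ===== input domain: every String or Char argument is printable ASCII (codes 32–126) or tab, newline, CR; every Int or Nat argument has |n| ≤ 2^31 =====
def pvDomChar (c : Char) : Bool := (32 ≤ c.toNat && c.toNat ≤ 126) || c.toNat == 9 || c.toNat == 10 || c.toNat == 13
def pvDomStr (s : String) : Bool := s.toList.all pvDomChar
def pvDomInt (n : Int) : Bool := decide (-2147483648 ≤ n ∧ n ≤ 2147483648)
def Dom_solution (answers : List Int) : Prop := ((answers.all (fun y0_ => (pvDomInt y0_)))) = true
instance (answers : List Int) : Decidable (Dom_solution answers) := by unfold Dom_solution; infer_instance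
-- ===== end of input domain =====

-- B never compares answers to the patterns while scanning: it builds a histogram keyed by
-- (position mod 40, answer) — 40 = lcm(5, 8, 10) — then derives each pattern's score from 40
-- bucket lookups, and selects the winners by max(scores) plus an ascending filter instead of
-- A's dict-sort-then-collect-ties.

-- ===== PORT A =====
-- body of A's for-loop (the three `if answers[i] == answerK[i%len(answerK)]: answer[K] += 1`;
-- the literals 5, 8, 10 are len(answer1), len(answer2), len(answer3))
def countStep (answers : List Int) (d : PySem.Dict Int Int) (i : Int) : PySem.Dict Int Int :=
  let d := if PySem.List.pyGetD answers i 0 = PySem.List.pyGetD [1, 2, 3, 4, 5] (PySem.Int.mod i 5) 0 then d.modify 1 0 (· + 1) else d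
  let d := if PySem.List.pyGetD answers i 0 = PySem.List.pyGetD [2, 1, 2, 3, 2, 4, 2, 5] (PySem.Int.mod i 8) 0 then d.modify 2 0 (· + 1) else d
  if PySem.List.pyGetD answers i 0 = PySem.List.pyGetD [3, 3, 1, 1, 2, 2, 4, 4, 5, 5] (PySem.Int.mod i 10) 0 then d.modify 3 0 (· + 1) else d

-- the `for i in range(len(sorted_dict)-1): … else break` loop collecting equal leading values
def tieCollect (prev : Int) (rest : List (Int × Int)) (acc : List Int) : List Int :=
  match rest with
  | [] => acc
  | (k, v) :: t => if v = prev then tieCollect v t (acc ++ [k]) else acc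

-- `result = [sorted_dict[0][0]]` followed by the tie loop (the [] arm is unreachable:
-- the dict always holds the three keys, so sorted_dict is never empty)
def firstAndTies (sortedDict : List (Int × Int)) : List Int :=
  match sortedDict with
  | [] => []
  | (k0, v0) :: rest => tieCollect v0 rest [k0]

def solution (answers : List Int) : List Int :=
  let answer0 : PySem.Dict Int Int := ((PySem.Dict.empty.insert 1 0).insert 2 0).insert 3 0
  let answer := (PySem.List.pyRange 0 (answers.length : Int) 1).foldl (countStep answers) answer0
  firstAndTies (PySem.List.sorted answer.items (fun item => item.2) true)

-- ===== PORT B =====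
-- `for i, a in enumerate(answers): key = (i % 40, a); freq[key] = freq.get(key, 0) + 1`
def freqBuild (answers : List Int) : PySem.Dict (Int × Int) Int :=
  (PySem.List.enumerate answers 0).foldl
    (fun d ia =>
      d.insert (PySem.Int.mod ia.1 40, ia.2) (d.getD (PySem.Int.mod ia.1 40, ia.2) 0 + 1))
    PySem.Dict.empty

-- `s = 0; for r in range(40): s += freq.get((r, p[r % len(p)]), 0)`
def scoreOf (freq : PySem.Dict (Int × Int) Int) (p : List Int) : Int :=
  (PySem.List.pyRange 0 40 1).foldl
    (fun s r => s + freq.getD (r, PySem.List.pyGetD p (PySem.Int.mod r (p.length : Int)) 0) 0) 0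

def solution_alt (answers : List Int) : List Int :=
  let patterns : List (List Int) := [[1, 2, 3, 4, 5], [2, 1, 2, 3, 2, 4, 2, 5], [3, 3, 1, 1, 2, 2, 4, 4, 5, 5]]
  let freq := freqBuild answers
  let scores := patterns.map (scoreOf freq)
  let mx := (PySem.List.max? scores (fun y => y)).getD 0
  (PySem.List.pyRange 0 3 1).foldl (fun res i => if PySem.List.pyGetD scores i 0 = mx then res ++ [i + 1] else res) []

-- ===== PRECONDITION & SPEC =====
def Spec_solution (answers : List Int) (out : List Int) : Prop := out = solution_alt answers
instance (answers : List Int) (out : List Int) : Decidable (Spec_solution answers out) := by unfold Spec_solution; infer_instance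

-- ===== CLAIM (what is proved, stated in full; the proofs are below) =====
def Claim_equal_solution : Prop := ∀ (answers : List Int), Dom_solution answers → Spec_solution answers (solution answers)

-- ===== LEMMAS AND PROOFS =====

-- common spec: number of positions j (counted from global index k) where xs matches the cycled pattern p
def cntSpec (p : List Int) (xs : List Int) (k : Nat) : Int :=
  match xs with
  | [] => 0
  | x :: t => (if x = p.getD (k % p.length) 0 then 1 else 0) + cntSpec p t (k + 1)

lemma cnt_drop (p ans : List Int) (k : Nat) (hk : k < ans.length) :
    cntSpec p (ans.drop k) k
      = (if ans.getD k 0 = p.getD (k % p.length) 0 then 1 else 0) + cntSpec p (ans.drop (k + 1)) (k + 1) := by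
  rw [List.drop_eq_getElem_cons hk]
  simp [cntSpec, List.getD, List.getElem?_eq_getElem hk]

lemma loopA (ans : List Int) : ∀ (m k : Nat) (a b c : Int), ans.length - k = m → k ≤ ans.length →
    (PySem.List.pyRange (k : Int) (ans.length : Int) 1).foldl (countStep ans) (PySem.Dict.mk [(1, a), (2, b), (3, c)])
      = PySem.Dict.mk [(1, a + cntSpec [1, 2, 3, 4, 5] (ans.drop k) k),
                       (2, b + cntSpec [2, 1, 2, 3, 2, 4, 2, 5] (ans.drop k) k),
                       (3, c + cntSpec [3, 3, 1, 1, 2, 2, 4, 4, 5, 5] (ans.drop k) k)] := by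
  intro m
  induction m with
  | zero =>
    intro k a b c hm hk
    have hkl : k = ans.length := by omega
    subst hkl
    rw [PySem.List.pyRange_one_eq_nil (le_refl _)]
    simp [cntSpec]
  | succ m ih =>
    intro k a b c hm hk
    have hklt : k < ans.length := by omega
    have hcast : ((k : Int) + 1) = (((k + 1 : Nat)) : Int) := by push_cast; ring
    have hstep : countStep ans (PySem.Dict.mk [(1, a), (2, b), (3, c)]) (k : Int)
        = PySem.Dict.mk
            [(1, a + (if ans.getD k 0 = List.getD [1, 2, 3, 4, 5] (k % 5) 0 then 1 else 0)),
             (2, b + (if ans.getD k 0 = List.getD [2, 1, 2, 3, 2, 4, 2, 5] (k % 8) 0 then 1 else 0)),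
             (3, c + (if ans.getD k 0 = List.getD [3, 3, 1, 1, 2, 2, 4, 4, 5, 5] (k % 10) 0 then 1 else 0))] := by
      unfold countStep
      have m5 : PySem.Int.mod (k : Int) 5 = ((k % 5 : Nat) : Int) := by
        exact_mod_cast PySem.Int.mod_natCast k 5
      have m8 : PySem.Int.mod (k : Int) 8 = ((k % 8 : Nat) : Int) := by
        exact_mod_cast PySem.Int.mod_natCast k 8
      have m10 : PySem.Int.mod (k : Int) 10 = ((k % 10 : Nat) : Int) := by
        exact_mod_cast PySem.Int.mod_natCast k 10
      rw [m5, m8, m10]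
      simp only [PySem.List.pyGetD_natCast]
      split_ifs <;>
        simp_all [PySem.Dict.modify, PySem.Dict.insert, PySem.Dict.getD, PySem.Dict.get?]
    rw [PySem.List.pyRange_one_cons (by exact_mod_cast hklt), List.foldl_cons, hstep, hcast,
        ih (k + 1) _ _ _ (by omega) (by omega),
        cnt_drop [1, 2, 3, 4, 5] ans k hklt,
        cnt_drop [2, 1, 2, 3, 2, 4, 2, 5] ans k hklt,
        cnt_drop [3, 3, 1, 1, 2, 2, 4, 4, 5, 5] ans k hklt]
    norm_num
    refine ⟨by ring, by ring, by ring⟩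

-- B-side spec: occurrences, among xs starting at global index k, of the bucket `key`
def occ (xs : List Int) (k : Nat) (key : Int × Int) : Int :=
  match xs with
  | [] => 0
  | x :: t => (if (((k % 40 : Nat) : Int), x) = key then 1 else 0) + occ t (k + 1) key

lemma freq_fold (xs : List Int) : ∀ (k : Nat) (d : PySem.Dict (Int × Int) Int) (key : Int × Int),
    ((PySem.List.enumerate xs (k : Int)).foldl
      (fun d ia => d.insert (PySem.Int.mod ia.1 40, ia.2) (d.getD (PySem.Int.mod ia.1 40, ia.2) 0 + 1)) d).getD key 0
      = d.getD key 0 + occ xs k key := by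
  induction xs with
  | nil => intro k d key; simp [PySem.List.enumerate_nil, occ]
  | cons x t ih =>
    intro k d key
    have hm : PySem.Int.mod (k : Int) 40 = ((k % 40 : Nat) : Int) := by
      exact_mod_cast PySem.Int.mod_natCast k 40
    have hcast : ((k : Int) + 1) = (((k + 1 : Nat)) : Int) := by push_cast; ring
    rw [PySem.List.enumerate_cons, List.foldl_cons, hcast, ih, hm, PySem.Dict.getD_insert]
    simp only [occ]
    by_cases h : key = (((k % 40 : Nat) : Int), x)
    · rw [if_pos h, if_pos h.symm, h]; ring
    · rw [if_neg h, if_neg (fun e => h e.symm)]; ring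

-- sum of f 0 + f 1 + … + f (m-1)
def sumTo (f : Nat → Int) : Nat → Int
  | 0 => 0
  | m + 1 => sumTo f m + f m

lemma sumTo_zero (m : Nat) : sumTo (fun _ => (0 : Int)) m = 0 := by
  induction m with
  | zero => rfl
  | succ m ih => simp [sumTo, ih]

lemma sumTo_congr (f g : Nat → Int) (m : Nat) (h : ∀ j, j < m → f j = g j) :
    sumTo f m = sumTo g m := by
  induction m with
  | zero => rfl
  | succ m ih => simp [sumTo, ih (fun j hj => h j (by omega)), h m (by omega)]

lemma sumTo_add (f g : Nat → Int) (m : Nat) :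
    sumTo (fun j => f j + g j) m = sumTo f m + sumTo g m := by
  induction m with
  | zero => rfl
  | succ m ih => simp [sumTo, ih]; ring

-- the score loop over range(40) is sumTo of the bucket lookups
lemma foldl_range_sum (f : Int → Int) : ∀ (m : Nat) (c : Int),
    (PySem.List.pyRange 0 (m : Int) 1).foldl (fun s r => s + f r) c = c + sumTo (fun j => f (j : Int)) m := by
  intro m
  induction m with
  | zero => intro c; simp [PySem.List.pyRange_one_eq_nil, sumTo]
  | succ m ih =>
    intro c
    have hcast : ((m : Int) + 1) = (((m + 1 : Nat)) : Int) := by push_cast; ring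
    rw [← hcast, PySem.List.pyRange_one_succ_right (by positivity), List.foldl_append, ih]
    simp [sumTo]; ring

-- the indicator sum: exactly one bucket r = i fires
lemma sumTo_indicator (v : Nat → Int) (x : Int) : ∀ (m i : Nat),
    sumTo (fun j => if (((i : Nat) : Int), x) = (((j : Nat) : Int), v j) then 1 else 0) m
      = if i < m ∧ x = v i then 1 else 0 := by
  intro m
  induction m with
  | zero => intro i; simp [sumTo]
  | succ m ih =>
    intro i
    rw [sumTo, ih]
    by_cases hi : i = m
    · subst hi
      simp only [Prod.mk.injEq]
      split_ifs <;> first | omega | simp_all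
    · have hne : ¬ ((((i : Nat) : Int), x) = (((m : Nat) : Int), v m)) := by
        intro h; exact hi (by exact_mod_cast (Prod.mk.injEq .. ▸ h).1)
      rw [if_neg hne]
      split_ifs <;> omega
    
-- summing the buckets a pattern hits recovers its match count (p's length divides 40)
lemma sum_occ (p : List Int) (hd : p.length ∣ 40) :
    ∀ (xs : List Int) (k : Nat),
    sumTo (fun j => occ xs k (((j : Nat) : Int), p.getD (j % p.length) 0)) 40 = cntSpec p xs k := by
  intro xs
  induction xs with
  | nil =>
    intro k
    simp only [occ, cntSpec]
    exact sumTo_zero 40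
  | cons x t ih =>
    intro k
    have hsplit : sumTo (fun j => occ (x :: t) k (((j : Nat) : Int), p.getD (j % p.length) 0)) 40
        = sumTo (fun j => if (((k % 40 : Nat) : Int), x) = (((j : Nat) : Int), p.getD (j % p.length) 0) then 1 else 0) 40
          + sumTo (fun j => occ t (k + 1) (((j : Nat) : Int), p.getD (j % p.length) 0)) 40 := by
      rw [← sumTo_add]; rfl
    rw [cntSpec, hsplit, ih (k + 1), sumTo_indicator (fun j => p.getD (j % p.length) 0) x 40 (k % 40)]
    have hmm : k % 40 % p.length = k % p.length := Nat.mod_mod_of_dvd k hd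
    have h40 : k % 40 < 40 := Nat.mod_lt _ (by omega)
    simp [hmm, h40]

lemma freqBuild_getD (ans : List Int) (key : Int × Int) :
    (freqBuild ans).getD key 0 = occ ans 0 key := by
  have h := freq_fold ans 0 PySem.Dict.empty key
  norm_num at h
  simpa [freqBuild, PySem.Dict.getD, PySem.Dict.get?, PySem.Dict.empty] using h

lemma score_eq (p : List Int) (hd : p.length ∣ 40) (ans : List Int) :
    scoreOf (freqBuild ans) p = cntSpec p ans 0 := by
  unfold scoreOf
  have h40 : (40 : Int) = ((40 : Nat) : Int) := by norm_num
  rw [h40, foldl_range_sum (fun r => (freqBuild ans).getD (r, PySem.List.pyGetD p (PySem.Int.mod r (p.length : Int)) 0) 0) 40 0,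
      ← sum_occ p hd ans 0, zero_add]
  apply sumTo_congr
  intro j hj
  have hm : PySem.Int.mod (j : Int) (p.length : Int) = ((j % p.length : Nat) : Int) := by
    exact_mod_cast PySem.Int.mod_natCast j p.length
  rw [hm, PySem.List.pyGetD_natCast, freqBuild_getD]

lemma tail_eq (a b c : Int) :
    firstAndTies (PySem.List.sorted [((1:Int), a), (2, b), (3, c)] (fun item => item.2) true)
      = (PySem.List.pyRange 0 3 1).foldl
          (fun res i => if PySem.List.pyGetD [a, b, c] i 0 = (PySem.List.max? [a, b, c] (fun y => y)).getD 0 then res ++ [i + 1] else res) [] := by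
  have hr : PySem.List.pyRange 0 3 1 = [0, 1, 2] := by decide
  have hm : (PySem.List.max? [a, b, c] (fun y => y)).getD 0 = max (max a b) c := by
    rw [PySem.List.max?_id_cons]; simp [List.foldl]
  have g0 : PySem.List.pyGetD [a, b, c] 0 0 = a := rfl
  have g1 : PySem.List.pyGetD [a, b, c] 1 0 = b := rfl
  have g2 : PySem.List.pyGetD [a, b, c] 2 0 = c := rfl
  unfold firstAndTies
  rw [PySem.List.sorted_rev_eq_foldl_insertBy, hr]
  simp only [List.foldl, hm, g0, g1, g2, max_def]
  repeat' (first
    | decide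
    | omega
    | split_ifs
    | simp only [PySem.List.insertBy, tieCollect, decide_eq_true_eq])

lemma solution_eq (ans : List Int) :
    solution ans = firstAndTies (PySem.List.sorted
      [((1:Int), cntSpec [1, 2, 3, 4, 5] ans 0),
       (2, cntSpec [2, 1, 2, 3, 2, 4, 2, 5] ans 0),
       (3, cntSpec [3, 3, 1, 1, 2, 2, 4, 4, 5, 5] ans 0)] (fun item => item.2) true) := by
  have h0 : ((PySem.Dict.empty.insert 1 (0:Int)).insert 2 0).insert (3:Int) 0 = PySem.Dict.mk [(1, 0), (2, 0), (3, 0)] := by decide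
  have hl := loopA ans ans.length 0 0 0 0 (by omega) (by omega)
  norm_num at hl
  unfold solution
  dsimp only []
  rw [h0, hl]

lemma solution_alt_eq (ans : List Int) :
    solution_alt ans = (PySem.List.pyRange 0 3 1).foldl
      (fun res i => if PySem.List.pyGetD
          [cntSpec [1, 2, 3, 4, 5] ans 0,
           cntSpec [2, 1, 2, 3, 2, 4, 2, 5] ans 0,
           cntSpec [3, 3, 1, 1, 2, 2, 4, 4, 5, 5] ans 0] i 0
        = (PySem.List.max? [cntSpec [1, 2, 3, 4, 5] ans 0,
           cntSpec [2, 1, 2, 3, 2, 4, 2, 5] ans 0,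
           cntSpec [3, 3, 1, 1, 2, 2, 4, 4, 5, 5] ans 0] (fun y => y)).getD 0
        then res ++ [i + 1] else res) [] := by
  unfold solution_alt
  dsimp only []
  rw [List.map_cons, List.map_cons, List.map_cons, List.map_nil,
      score_eq [1, 2, 3, 4, 5] (by decide) ans,
      score_eq [2, 1, 2, 3, 2, 4, 2, 5] (by decide) ans,
      score_eq [3, 3, 1, 1, 2, 2, 4, 4, 5, 5] (by decide) ans]

-- ===== VERDICT (by name: the statement is the Claim_ definition above) =====
theorem solution_spec : Claim_equal_solution := by
  intro ans _
  unfold Spec_solution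
  rw [solution_eq, solution_alt_eq, tail_eq]
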